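-- pv_equiv track=rewrite | github.com/k-harada/AtCoder | other_contests/UECCP-20250414/B.py | solve
-- ===== SOURCE A (Python) =====
-- from bisect import bisect_left, bisect_right
--
-- def solve(n, x_list, p_list, q, lr_list):
--     res = []
--     cum_sum = [0]
--     for p in p_list:
--         cum_sum.append(cum_sum[-1] + p)
--     for left, right in lr_list:
--         left_id = bisect_left(x_list, left)
--         right_id = bisect_right(x_list, right)
--         res.append(cum_sum[right_id] - cum_sum[left_id])
--     return res
-- ===== SOURCE B (Python) =====
-- from bisect import bisect_left, bisect_right
--
--
-- def solve(n, x_list, p_list, q, lr_list):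
--     # No precomputed prefix table: each query is answered by two direct
--     # left-to-right scans of p_list prefixes.
--     return [
--         sum(p_list[:bisect_right(x_list, right)]) - sum(p_list[:bisect_left(x_list, left)])
--         for left, right in lr_list
--     ]
-- ===== Notes on version B (the rewrite author's own statement) =====
-- stated objective: simpler
-- what changed: Drops A's precomputed cum_sum prefix array and its append-loop entirely; B answers each query as a single comprehension by summing two prefixes of p_list directly (sum(p_list[:right_id]) - sum(p_list[:left_id])), which reproduces A's prefix-difference value exactly, including on unsorted x_list and reversed queries.
import Mathlib
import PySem

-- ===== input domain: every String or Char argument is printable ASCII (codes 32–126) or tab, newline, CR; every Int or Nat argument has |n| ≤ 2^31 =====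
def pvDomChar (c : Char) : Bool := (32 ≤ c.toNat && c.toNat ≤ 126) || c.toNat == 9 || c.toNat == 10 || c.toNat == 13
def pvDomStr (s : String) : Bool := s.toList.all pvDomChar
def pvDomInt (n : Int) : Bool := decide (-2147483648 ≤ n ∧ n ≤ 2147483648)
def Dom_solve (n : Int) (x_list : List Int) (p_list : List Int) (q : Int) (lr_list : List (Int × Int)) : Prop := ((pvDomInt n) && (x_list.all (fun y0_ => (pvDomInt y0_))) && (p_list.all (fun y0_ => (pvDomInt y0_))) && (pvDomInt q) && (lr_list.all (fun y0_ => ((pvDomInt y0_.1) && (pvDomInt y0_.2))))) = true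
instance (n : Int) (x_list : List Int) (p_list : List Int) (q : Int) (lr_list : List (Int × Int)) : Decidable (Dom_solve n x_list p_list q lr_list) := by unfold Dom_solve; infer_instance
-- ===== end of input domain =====

-- B drops A's precomputed cum_sum prefix array and answers each query by summing two
-- prefixes of p_list directly (simpler; same values, including on unsorted x_list).

-- ===== PORT A =====
def solve (n : Int) (x_list : List Int) (p_list : List Int) (q : Int) (lr_list : List (Int × Int)) : List Int :=
  -- cum_sum = [0]; for p in p_list: cum_sum.append(cum_sum[-1] + p)
  let cum_sum : List Int := p_list.foldl (fun cs p => cs ++ [PySem.List.pyGetD cs (-1) 0 + p]) [0]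
  -- for left, right in lr_list: res.append(cum_sum[right_id] - cum_sum[left_id])
  -- cum_sum[id] raises IndexError when id > len(p_list); Pre_solve excludes that (getD default never read inside Pre_).
  lr_list.foldl (fun res lr =>
    let left_id := PySem.List.bisectLeft x_list lr.1
    let right_id := PySem.List.bisectRight x_list lr.2
    res ++ [cum_sum.getD right_id 0 - cum_sum.getD left_id 0]) []

-- ===== PORT B =====
def solve_alt (n : Int) (x_list : List Int) (p_list : List Int) (q : Int) (lr_list : List (Int × Int)) : List Int :=
  -- [sum(p_list[:bisect_right(x_list, r)]) - sum(p_list[:bisect_left(x_list, l)]) for l, r in lr_list]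
  lr_list.map (fun lr =>
    (p_list.take (PySem.List.bisectRight x_list lr.2)).sum
      - (p_list.take (PySem.List.bisectLeft x_list lr.1)).sum)

-- ===== PRECONDITION & SPEC =====
-- Pre_ excludes exactly the inputs on which A raises IndexError: a query whose bisect
-- index exceeds len(p_list), so that A reads past its cum_sum table (len(p_list) + 1 entries).
def Pre_solve (n : Int) (x_list : List Int) (p_list : List Int) (q : Int) (lr_list : List (Int × Int)) : Prop :=
  ∀ lr ∈ lr_list, PySem.List.bisectLeft x_list lr.1 ≤ p_list.length ∧
    PySem.List.bisectRight x_list lr.2 ≤ p_list.length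
instance (n : Int) (x_list : List Int) (p_list : List Int) (q : Int) (lr_list : List (Int × Int)) : Decidable (Pre_solve n x_list p_list q lr_list) := by unfold Pre_solve; infer_instance

def pvWitness_solve : Int × List Int × List Int × Int × (List (Int × Int)) :=
  (3, [1, 2, 3], [10, 20, 30], 2, [(1, 2), (2, 3)])

def Spec_solve (n : Int) (x_list : List Int) (p_list : List Int) (q : Int) (lr_list : List (Int × Int)) (out : List Int) : Prop := out = solve_alt n x_list p_list q lr_list
instance (n : Int) (x_list : List Int) (p_list : List Int) (q : Int) (lr_list : List (Int × Int)) (out : List Int) : Decidable (Spec_solve n x_list p_list q lr_list out) := by unfold Spec_solve; infer_instance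

-- ===== CLAIM (what is proved, stated in full; the proofs are below) =====
def Claim_equal_solve : Prop := ∀ (n : Int) (x_list : List Int) (p_list : List Int) (q : Int) (lr_list : List (Int × Int)), Dom_solve n x_list p_list q lr_list → Pre_solve n x_list p_list q lr_list → Spec_solve n x_list p_list q lr_list (solve n x_list p_list q lr_list)

-- ===== LEMMAS AND PROOFS =====

-- A's cum_sum loop produces exactly the list of prefix sums of p_list.
theorem cumSum_eq (p_list : List Int) :
    p_list.foldl (fun cs p => cs ++ [PySem.List.pyGetD cs (-1) 0 + p]) [0]
      = (List.range (p_list.length + 1)).map (fun k => ((p_list.take k).sum : Int)) := by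
  induction p_list using List.reverseRecOn with
  | nil => simp
  | append_singleton p a ih =>
      rw [List.foldl_append, ih]
      have hne : (List.range (p.length + 1)).map (fun k => ((p.take k).sum : Int)) ≠ [] := by
        simp
      rw [List.foldl_cons, List.foldl_nil, PySem.List.pyGetD_neg_one _ _ hne]
      have hlast : ((List.range (p.length + 1)).map (fun k => ((p.take k).sum : Int))).getLast hne
          = p.sum := by
        simp [List.range_succ]
      rw [hlast]
      rw [List.length_append, List.length_singleton, List.range_succ (n := p.length + 1),
        List.map_append]
      congr 1
      · apply List.map_congr_left
        intro k hk
        rw [List.mem_range] at hk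
        rw [List.take_append_of_le_length (by omega)]
      · simp

-- Reading entry k of the prefix-sum list (k in range) gives the sum of the first k weights.
theorem cumSum_getD (p_list : List Int) (k : Nat) (hk : k ≤ p_list.length) :
    ((List.range (p_list.length + 1)).map (fun k => ((p_list.take k).sum : Int))).getD k 0
      = (p_list.take k).sum := by
  rw [List.getD_eq_getElem?_getD, List.getElem?_map, List.getElem?_range (by omega)]
  rfl

-- ===== VERDICT (by name: the statement is the Claim_ definition above) =====
theorem solve_spec : Claim_equal_solve := by
  intro n x_list p_list q lr_list _ hpre
  unfold Spec_solve solve solve_alt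
  rw [cumSum_eq]
  rw [PySem.List.foldl_append_singleton_eq_map]
  rw [List.nil_append]
  apply List.map_congr_left
  intro lr hmem
  obtain ⟨hl, hr⟩ := hpre lr hmem
  rw [cumSum_getD _ _ hr, cumSum_getD _ _ hl]
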